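-- pv_equiv track=rewrite | github.com/SystemDisc/realtime-translator | audio_config.py | extract_languages
-- ===== SOURCE A (Python) =====
-- def extract_languages(models):
--     """
--     Extract source and destination languages from the OPUS-MT models.
--
--     Args:
--         models (list): A list of models from the Hugging Face API.
--
--     Returns:
--         tuple: A sorted list of source languages and a dictionary mapping source languages to sets of destination languages.
--     """
--     source_languages = set()
--     destination_languages = {}
--
--     for model in models:
--         model_id = model['modelId']
--         if model_id.startswith('Helsinki-NLP/opus-mt'):
--             parts = model_id.split('-')
--             if len(parts) == 5:  # Ensure the format Helsinki-NLP/opus-mt-{source}-{destination}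
--                 source = parts[3]
--                 destination = parts[4]
--                 source_languages.add(source)
--                 if source not in destination_languages:
--                     destination_languages[source] = set()
--                 destination_languages[source].add(destination)
--
--     return sorted(source_languages), destination_languages
-- ===== SOURCE B (Python) =====
-- def extract_languages(models):
--     """Nested-scan rewrite: parse ids into (source, destination) pairs, dedup
--     the sources preserving first occurrence, then build each source's
--     destination set by an inner scan over the pairs (no incremental dict)."""
--     pairs = []
--     for model in models:
--         model_id = model['modelId']
--         if model_id.startswith('Helsinki-NLP/opus-mt'):
--             parts = model_id.split('-')
--             if len(parts) == 5:
--                 pairs.append((parts[3], parts[4]))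
--     sources = []
--     for s, _ in pairs:
--         if s not in sources:
--             sources.append(s)
--     return sorted(sources), {s: {d for x, d in pairs if x == s} for s in sources}
-- ===== Notes on version B (the rewrite author's own statement) =====
-- stated objective: alternative
-- what changed: Replaces A's single fused pass with an incrementally grown dict of sets by three stages: a parse pass collecting (source, destination) pairs, an order-preserving dedup of the sources, and a per-source inner scan of the pairs building each destination set, so no dict is maintained during traversal.
import Mathlib
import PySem

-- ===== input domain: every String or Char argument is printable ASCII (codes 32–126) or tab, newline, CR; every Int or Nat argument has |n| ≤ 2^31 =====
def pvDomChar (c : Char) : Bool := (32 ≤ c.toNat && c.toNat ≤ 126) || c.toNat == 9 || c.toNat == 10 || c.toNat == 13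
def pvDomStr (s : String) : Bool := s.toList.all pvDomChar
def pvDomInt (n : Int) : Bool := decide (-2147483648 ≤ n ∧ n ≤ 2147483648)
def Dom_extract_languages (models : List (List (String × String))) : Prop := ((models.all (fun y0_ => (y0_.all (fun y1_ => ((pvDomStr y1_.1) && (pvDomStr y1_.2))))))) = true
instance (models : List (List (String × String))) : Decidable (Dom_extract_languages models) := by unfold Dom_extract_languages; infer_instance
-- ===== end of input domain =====

-- B replaces A's fused pass with its incrementally grown dict of sets by a parse pass,
-- an order-preserving dedup of sources, and a per-source inner scan collecting each
-- destination set; same return value on every input where A returns.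

-- ===== PORT A =====
-- A's single loop over models, maintaining (source set, destination dict)
def extract_languages (models : List (List (String × String))) : List String × (List (String × List String)) :=
  let st := models.foldl
    (fun (st : PySem.Set String × PySem.Dict String (PySem.Set String)) model =>
      -- model['modelId']: KeyError (excluded by Pre_) ported as default ""
      let model_id := ((PySem.Dict.mk model).get? "modelId").getD ""
      if PySem.Str.startswith model_id "Helsinki-NLP/opus-mt" then
        -- model_id.split('-'): separator nonempty, so split? is always some
        let parts := (PySem.Str.split? model_id "-").getD []
        if parts.length == 5 then
          let source := PySem.List.pyGetD parts 3 ""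
          let destination := PySem.List.pyGetD parts 4 ""
          let sl := PySem.Set.add st.1 source
          let dl := if st.2.contains source then st.2 else st.2.insert source PySem.Set.empty
          -- destination_languages[source].add(destination); source is present, dflt unused
          let dl := dl.modify source PySem.Set.empty (fun s => PySem.Set.add s destination)
          (sl, dl)
        else st
      else st)
    (PySem.Set.empty, PySem.Dict.empty)
  (PySem.List.sorted st.1 (fun x => x) false, st.2.items)

-- ===== PORT B =====
def extract_languages_alt (models : List (List (String × String))) : List String × (List (String × List String)) :=
  -- stage 1: parse pass collecting (source, destination) pairs
  let pairs := models.foldl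
    (fun (acc : List (String × String)) model =>
      let model_id := ((PySem.Dict.mk model).get? "modelId").getD ""
      if PySem.Str.startswith model_id "Helsinki-NLP/opus-mt" then
        let parts := (PySem.Str.split? model_id "-").getD []
        if parts.length == 5 then
          acc ++ [(PySem.List.pyGetD parts 3 "", PySem.List.pyGetD parts 4 "")]
        else acc
      else acc)
    []
  -- stage 2: 'if s not in sources: sources.append(s)' is exactly PySem.Set.add
  let sources := pairs.foldl (fun (ss : PySem.Set String) p => PySem.Set.add ss p.1) PySem.Set.empty
  -- stage 3: dict comprehension; each value is a set built by an inner scan of pairs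
  let d := sources.foldl
    (fun (d : PySem.Dict String (PySem.Set String)) s =>
      d.insert s (PySem.Set.ofList ((pairs.filter (fun p => p.1 == s)).map (·.2))))
    PySem.Dict.empty
  (PySem.List.sorted sources (fun x => x) false, d.items)

-- ===== PRECONDITION & SPEC =====
-- Pre_ excludes exactly the inputs on which A raises KeyError: a model without a 'modelId' key.
def Pre_extract_languages (models : List (List (String × String))) : Prop :=
  (models.all (fun model => model.any (fun p => p.1 == "modelId"))) = true
instance (models : List (List (String × String))) : Decidable (Pre_extract_languages models) := by unfold Pre_extract_languages; infer_instance
def pvWitness_extract_languages : (List (List (String × String))) :=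
  [[("modelId", "Helsinki-NLP/opus-mt-en-de")], [("modelId", "other")]]
def Spec_extract_languages (models : List (List (String × String))) (out : List String × (List (String × List String))) : Prop := out = extract_languages_alt models
instance (models : List (List (String × String))) (out : List String × (List (String × List String))) : Decidable (Spec_extract_languages models out) := by unfold Spec_extract_languages; infer_instance

-- ===== CLAIM (what is proved, stated in full; the proofs are below) =====
def Claim_equal_extract_languages : Prop := ∀ (models : List (List (String × String))), Dom_extract_languages models → Pre_extract_languages models → Spec_extract_languages models (extract_languages models)

-- ===== LEMMAS AND PROOFS =====

-- the shared per-model parse, used only by the proofs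
def pvParse (model : List (String × String)) : Option (String × String) :=
  let model_id := ((PySem.Dict.mk model).get? "modelId").getD ""
  if PySem.Str.startswith model_id "Helsinki-NLP/opus-mt" then
    let parts := (PySem.Str.split? model_id "-").getD []
    if parts.length == 5 then
      some (PySem.List.pyGetD parts 3 "", PySem.List.pyGetD parts 4 "")
    else none
  else none

-- A's per-pair dict step, used only by the proofs
def pvStepD (d : PySem.Dict String (PySem.Set String)) (p : String × String) : PySem.Dict String (PySem.Set String) :=
  (d.setdefault p.1 PySem.Set.empty).modify p.1 PySem.Set.empty (fun s => PySem.Set.add s p.2)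

lemma pvStepD_keys (d : PySem.Dict String (PySem.Set String)) (p : String × String) :
    (pvStepD d p).keys = PySem.Set.add d.keys p.1 := by
  unfold pvStepD
  by_cases h : d.contains p.1 = true
  · rw [PySem.Dict.setdefault_of_contains d _ h, PySem.Dict.keys_modify,
      PySem.Dict.keys_insert_of_contains d _ h,
      PySem.Set.add_of_mem ((PySem.Dict.contains_iff_mem_keys d p.1).mp h)]
  · have h' : d.contains p.1 = false := by simpa using h
    rw [PySem.Dict.setdefault_of_not_contains d _ h', PySem.Dict.keys_modify]
    have hc : (d.insert p.1 (PySem.Set.empty : PySem.Set String)).contains p.1 = true := by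
      simp
    rw [PySem.Dict.keys_insert_of_contains _ _ hc, PySem.Dict.keys_insert_of_not_contains d _ h',
      PySem.Set.add_of_not_mem]
    intro hm
    exact absurd ((PySem.Dict.contains_iff_mem_keys d p.1).mpr hm) (by simp [h'])

lemma pvStepD_getD (d : PySem.Dict String (PySem.Set String)) (p : String × String) (s : String) :
    (pvStepD d p).getD s PySem.Set.empty =
      if s = p.1 then PySem.Set.add (d.getD p.1 PySem.Set.empty) p.2 else d.getD s PySem.Set.empty := by
  unfold pvStepD
  rw [PySem.Dict.getD_modify]
  by_cases hs : s = p.1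
  · simp [hs, PySem.Dict.getD_setdefault_self]
  · rw [if_neg hs, if_neg hs, PySem.Dict.getD_eq_get?_getD,
      PySem.Dict.get?_setdefault_of_ne d _ hs, ← PySem.Dict.getD_eq_get?_getD]

-- A's loop step is pvParse followed by (Set.add, pvStepD)
lemma pvStepA_eq (st : PySem.Set String × PySem.Dict String (PySem.Set String))
    (model : List (String × String)) :
    (let model_id := ((PySem.Dict.mk model).get? "modelId").getD ""
     if PySem.Str.startswith model_id "Helsinki-NLP/opus-mt" then
       let parts := (PySem.Str.split? model_id "-").getD []
       if parts.length == 5 then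
         let source := PySem.List.pyGetD parts 3 ""
         let destination := PySem.List.pyGetD parts 4 ""
         let sl := PySem.Set.add st.1 source
         let dl := if st.2.contains source then st.2 else st.2.insert source PySem.Set.empty
         let dl := dl.modify source PySem.Set.empty (fun s => PySem.Set.add s destination)
         (sl, dl)
       else st
     else st)
    = match pvParse model with
      | none => st
      | some p => (PySem.Set.add st.1 p.1, pvStepD st.2 p) := by
  unfold pvParse pvStepD
  by_cases h1 : PySem.Str.startswith (((PySem.Dict.mk model).get? "modelId").getD "") "Helsinki-NLP/opus-mt" = true
  · by_cases h2 : (((PySem.Str.split? (((PySem.Dict.mk model).get? "modelId").getD "") "-").getD []).length == 5) = true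
    · by_cases h3 : st.2.contains (PySem.List.pyGetD ((PySem.Str.split? (((PySem.Dict.mk model).get? "modelId").getD "") "-").getD []) 3 "") = true
      · simp [PySem.Str.startswith] at h1
        simp only [beq_iff_eq] at h2
        simp [h1, h2, h3]
        rw [PySem.Dict.setdefault_of_contains st.2 _ h3]
      · have h3' : st.2.contains (PySem.List.pyGetD ((PySem.Str.split? (((PySem.Dict.mk model).get? "modelId").getD "") "-").getD []) 3 "") = false := by
          simpa using h3
        simp [PySem.Str.startswith] at h1
        simp only [beq_iff_eq] at h2
        simp [h1, h2, h3']
        rw [PySem.Dict.setdefault_of_not_contains st.2 _ h3']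
    · simp [PySem.Str.startswith] at h1
      simp only [beq_iff_eq] at h2
      simp [h1, h2]
  · simp [PySem.Str.startswith] at h1
    simp [h1]

-- B's parse loop collects exactly the filterMap of pvParse
lemma pvPairs_eq (models : List (List (String × String))) (acc : List (String × String)) :
    models.foldl
      (fun (acc : List (String × String)) model =>
        let model_id := ((PySem.Dict.mk model).get? "modelId").getD ""
        if PySem.Str.startswith model_id "Helsinki-NLP/opus-mt" then
          let parts := (PySem.Str.split? model_id "-").getD []
          if parts.length == 5 then
            acc ++ [(PySem.List.pyGetD parts 3 "", PySem.List.pyGetD parts 4 "")]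
          else acc
        else acc)
      acc
    = acc ++ models.filterMap pvParse := by
  induction models generalizing acc with
  | nil => simp
  | cons m rest ih =>
    have hstep :
        (let model_id := ((PySem.Dict.mk m).get? "modelId").getD ""
         if PySem.Str.startswith model_id "Helsinki-NLP/opus-mt" then
           let parts := (PySem.Str.split? model_id "-").getD []
           if parts.length == 5 then
             acc ++ [(PySem.List.pyGetD parts 3 "", PySem.List.pyGetD parts 4 "")]
           else acc
         else acc)
        = acc ++ (pvParse m).toList := by
      unfold pvParse
      by_cases h1 : PySem.Str.startswith (((PySem.Dict.mk m).get? "modelId").getD "") "Helsinki-NLP/opus-mt" = true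
      · by_cases h2 : (((PySem.Str.split? (((PySem.Dict.mk m).get? "modelId").getD "") "-").getD []).length == 5) = true
        · simp [PySem.Str.startswith] at h1
          simp only [beq_iff_eq] at h2
          simp [h1, h2]
        · simp [PySem.Str.startswith] at h1
          simp only [beq_iff_eq] at h2
          simp [h1, h2]
      · simp [PySem.Str.startswith] at h1
        simp [h1]
    rw [List.foldl_cons, hstep, ih, List.filterMap_cons]
    cases pvParse m <;> simp

-- A's fused fold from (d.keys, d) lands on (G.keys, G), G the pvStepD fold over the pairs
lemma pvInv (models : List (List (String × String))) (d : PySem.Dict String (PySem.Set String)) :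
    models.foldl
      (fun (st : PySem.Set String × PySem.Dict String (PySem.Set String)) model =>
        match pvParse model with
        | none => st
        | some p => (PySem.Set.add st.1 p.1, pvStepD st.2 p))
      (d.keys, d)
    = (((models.filterMap pvParse).foldl pvStepD d).keys, (models.filterMap pvParse).foldl pvStepD d) := by
  induction models generalizing d with
  | nil => simp
  | cons m rest ih =>
    simp only [List.foldl_cons, List.filterMap_cons]
    cases h : pvParse m with
    | none => simpa [h] using ih d
    | some p =>
      simp only [List.foldl_cons]
      rw [← pvStepD_keys d p]
      exact ih (pvStepD d p)

-- keys of A's dict fold = B's Set.add fold over the pairs' sources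
lemma pvKeys_foldl (ps : List (String × String)) (d : PySem.Dict String (PySem.Set String)) :
    (ps.foldl pvStepD d).keys = ps.foldl (fun (ss : PySem.Set String) p => PySem.Set.add ss p.1) d.keys := by
  induction ps generalizing d with
  | nil => rfl
  | cons p rest ih =>
    simp only [List.foldl_cons]
    rw [ih (pvStepD d p), pvStepD_keys]

-- each value of A's dict fold is the Set.add fold of the matching destinations
lemma pvGetD_foldl (ps : List (String × String)) (d : PySem.Dict String (PySem.Set String)) (s : String) :
    (ps.foldl pvStepD d).getD s PySem.Set.empty =
      ((ps.filter (fun p => p.1 == s)).map (·.2)).foldl PySem.Set.add (d.getD s PySem.Set.empty) := by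
  induction ps generalizing d with
  | nil => rfl
  | cons p rest ih =>
    simp only [List.foldl_cons, List.filter_cons]
    by_cases hp : p.1 = s
    · simp only [hp, beq_self_eq_true, if_pos]
      rw [ih (pvStepD d p), pvStepD_getD]
      simp [hp]
    · have : (p.1 == s) = false := by simp [hp]
      simp only [this, Bool.false_eq_true, if_neg, not_false_iff]
      rw [ih (pvStepD d p), pvStepD_getD]
      rw [if_neg (fun h => hp h.symm)]

-- ===== VERDICT (by name: the statement is the Claim_ definition above) =====
theorem extract_languages_spec : Claim_equal_extract_languages := by
  intro models _ _
  unfold Spec_extract_languages extract_languages extract_languages_alt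
  have hA : models.foldl
      (fun (st : PySem.Set String × PySem.Dict String (PySem.Set String)) model =>
        let model_id := ((PySem.Dict.mk model).get? "modelId").getD ""
        if PySem.Str.startswith model_id "Helsinki-NLP/opus-mt" then
          let parts := (PySem.Str.split? model_id "-").getD []
          if parts.length == 5 then
            let source := PySem.List.pyGetD parts 3 ""
            let destination := PySem.List.pyGetD parts 4 ""
            let sl := PySem.Set.add st.1 source
            let dl := if st.2.contains source then st.2 else st.2.insert source PySem.Set.empty
            let dl := dl.modify source PySem.Set.empty (fun s => PySem.Set.add s destination)
            (sl, dl)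
          else st
        else st)
      (PySem.Set.empty, PySem.Dict.empty)
      = models.foldl
        (fun (st : PySem.Set String × PySem.Dict String (PySem.Set String)) model =>
          match pvParse model with
          | none => st
          | some p => (PySem.Set.add st.1 p.1, pvStepD st.2 p))
        (PySem.Set.empty, PySem.Dict.empty) := by
    refine PySem.List.foldl_congr_mem _ _ _ _ ?_
    intro acc x _
    exact pvStepA_eq acc x
  rw [hA]
  have hEmpty : ((PySem.Set.empty : PySem.Set String), (PySem.Dict.empty : PySem.Dict String (PySem.Set String)))
      = ((PySem.Dict.empty : PySem.Dict String (PySem.Set String)).keys, (PySem.Dict.empty : PySem.Dict String (PySem.Set String))) := rfl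
  rw [hEmpty, pvInv, pvPairs_eq models ([] : List (String × String)), List.nil_append]
  set ps := models.filterMap pvParse with hps
  set G := ps.foldl pvStepD PySem.Dict.empty with hG
  -- keys of G = B's sources
  have hkeys : G.keys = ps.foldl (fun (ss : PySem.Set String) p => PySem.Set.add ss p.1) PySem.Set.empty := by
    rw [hG, pvKeys_foldl]; rfl
  -- sources as ofList, for Nodup
  have hsrc : ps.foldl (fun (ss : PySem.Set String) p => PySem.Set.add ss p.1) PySem.Set.empty
      = PySem.Set.ofList (ps.map (·.1)) := by
    rw [← PySem.Set.update_map_eq_foldl_add, PySem.Set.update_empty]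
  have hnd : G.keys.Nodup := by
    rw [hkeys, hsrc]; exact PySem.Set.nodup_ofList _
  -- items of G = map over keys of getD
  have hitems : G.items = G.keys.map (fun k => (k, G.getD k PySem.Set.empty)) :=
    PySem.Dict.items_eq_map_keys G hnd PySem.Set.empty
  -- items of B's dict comprehension
  have hBitems : (G.keys.foldl
      (fun (d : PySem.Dict String (PySem.Set String)) s =>
        d.insert s (PySem.Set.ofList ((ps.filter (fun p => p.1 == s)).map (·.2))))
      PySem.Dict.empty).items
      = G.keys.map (fun s => (s, PySem.Set.ofList ((ps.filter (fun p => p.1 == s)).map (·.2)))) := by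
    have := PySem.Dict.items_foldl_insert_fresh (l := G.keys) (k := fun s => s)
      (v := fun s => PySem.Set.ofList ((ps.filter (fun p => p.1 == s)).map (·.2)))
      (d := PySem.Dict.empty)
      (by intro a _; exact PySem.Dict.contains_empty a)
      (by simpa using hnd)
    simpa using this
  have hval : ∀ s, G.getD s PySem.Set.empty = PySem.Set.ofList ((ps.filter (fun p => p.1 == s)).map (·.2)) := by
    intro s
    rw [hG, pvGetD_foldl, PySem.Set.ofList_eq_foldl]
    rfl
  refine Prod.ext ?_ ?_
  · simp only [hkeys]
  · simp only [← hkeys, hBitems, hitems]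
    exact List.map_congr_left (fun s _ => by rw [hval s])
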